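-- pv_equiv track=rewrite | github.com/jonathonreilly/toy-physics | scripts/frontier_s3_shellability.py | cubical_ball
-- ===== SOURCE A (Python) =====
-- def z3_ball_sites(R: int) -> list[tuple[int, int, int]]:
--     """All integer points within Euclidean distance R of origin."""
--     sites = []
--     for x in range(-R, R + 1):
--         for y in range(-R, R + 1):
--             for z in range(-R, R + 1):
--                 if x * x + y * y + z * z <= R * R:
--                     sites.append((x, y, z))
--     return sites
--
-- def cubical_ball(R: int) -> tuple[set, set]:
--     """
--     Return (vertices, cubes) of the cubical ball at radius R.
--     A cube is included iff all 8 corners lie within Euclidean R of origin.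
--     """
--     euc_sites = set(z3_ball_sites(R))
--     cubes = set()
--     for s in euc_sites:
--         x, y, z = s
--         corners = [(x + dx, y + dy, z + dz)
--                     for dx in (0, 1) for dy in (0, 1) for dz in (0, 1)]
--         if all(c in euc_sites for c in corners):
--             cubes.add(s)
--     verts = set()
--     for cube in cubes:
--         x, y, z = cube
--         for dx in (0, 1):
--             for dy in (0, 1):
--                 for dz in (0, 1):
--                     verts.add((x + dx, y + dy, z + dz))
--     return verts, cubes
-- ===== SOURCE B (Python) =====
-- def cubical_ball(R: int) -> tuple[set, set]:
--     """
--     Return (vertices, cubes) of the cubical ball at radius R.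
--     A cube is included iff all eight corners lie within Euclidean R of origin,
--     decided by a direct per-axis arithmetic test instead of corner-membership lookups.
--     """
--     rr = R * R
--     sites = {(x, y, z)
--              for x in range(-R, R + 1)
--              for y in range(-R, R + 1)
--              for z in range(-R, R + 1)
--              if x * x + y * y + z * z <= rr}
--     cubes = {(x, y, z) for (x, y, z) in sites
--              if max(x * x, (x + 1) * (x + 1))
--                 + max(y * y, (y + 1) * (y + 1))
--                 + max(z * z, (z + 1) * (z + 1)) <= rr}
--     verts = set()
--     for cube in cubes:
--         x, y, z = cube
--         for dx in (0, 1):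
--             for dy in (0, 1):
--                 for dz in (0, 1):
--                     verts.add((x + dx, y + dy, z + dz))
--     return verts, cubes
-- ===== Notes on version B (the rewrite author's own statement) =====
-- stated objective: alternative
-- what changed: B drops A's z3_ball_sites list, the per-site corners list and its eight set-membership probes, deciding each cube by a direct per-axis arithmetic test max(x^2,(x+1)^2)+max(y^2,(y+1)^2)+max(z^2,(z+1)^2) <= R^2; the site set remains only as the candidate enumeration.
import Mathlib
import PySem

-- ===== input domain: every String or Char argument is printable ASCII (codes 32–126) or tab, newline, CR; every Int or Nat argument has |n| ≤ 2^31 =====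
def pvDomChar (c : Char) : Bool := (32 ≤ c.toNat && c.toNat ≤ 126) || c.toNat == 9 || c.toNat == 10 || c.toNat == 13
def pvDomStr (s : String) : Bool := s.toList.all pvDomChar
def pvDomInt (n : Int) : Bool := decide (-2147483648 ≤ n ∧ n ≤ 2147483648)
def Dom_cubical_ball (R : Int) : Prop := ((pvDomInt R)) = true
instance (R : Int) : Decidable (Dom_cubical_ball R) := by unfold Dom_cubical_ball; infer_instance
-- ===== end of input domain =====

-- B drops A's corners list and its eight per-site membership probes, deciding each cube by a
-- direct per-axis arithmetic test; the site set is kept only as the candidate enumeration.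

-- ===== PORT A =====
def z3_ball_sites (R : Int) : List (Int × Int × Int) :=
  (PySem.List.pyRange (-R) (R + 1)).foldl (fun sites x =>
    (PySem.List.pyRange (-R) (R + 1)).foldl (fun sites y =>
      (PySem.List.pyRange (-R) (R + 1)).foldl (fun sites z =>
        if x * x + y * y + z * z ≤ R * R then sites ++ [(x, y, z)] else sites)
        sites) sites) []

def cubical_ball (R : Int) : (List (Int × Int × Int)) × (List (Int × Int × Int)) :=
  let euc_sites : PySem.Set (Int × Int × Int) := PySem.Set.ofList (z3_ball_sites R)
  let cubes : PySem.Set (Int × Int × Int) :=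
    euc_sites.foldl (fun cubes s =>
      let corners := [(0 : Int), 1].flatMap (fun dx => [(0 : Int), 1].flatMap (fun dy =>
        [(0 : Int), 1].map (fun dz => (s.1 + dx, s.2.1 + dy, s.2.2 + dz))))
      if corners.all (fun c => PySem.Set.contains euc_sites c) then PySem.Set.add cubes s
      else cubes) PySem.Set.empty
  let verts : PySem.Set (Int × Int × Int) :=
    cubes.foldl (fun verts cube =>
      [(0 : Int), 1].foldl (fun verts dx =>
        [(0 : Int), 1].foldl (fun verts dy =>
          [(0 : Int), 1].foldl (fun verts dz =>
            PySem.Set.add verts (cube.1 + dx, cube.2.1 + dy, cube.2.2 + dz))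
            verts) verts) verts) PySem.Set.empty
  (verts, cubes)

-- ===== PORT B =====
def cubical_ball_alt (R : Int) : (List (Int × Int × Int)) × (List (Int × Int × Int)) :=
  let rr := R * R
  let sites : PySem.Set (Int × Int × Int) := PySem.Set.ofList
    ((PySem.List.pyRange (-R) (R + 1)).flatMap (fun x =>
      (PySem.List.pyRange (-R) (R + 1)).flatMap (fun y =>
        ((PySem.List.pyRange (-R) (R + 1)).filter
          (fun z => decide (x * x + y * y + z * z ≤ rr))).map (fun z => (x, y, z)))))
  let cubes : PySem.Set (Int × Int × Int) := PySem.Set.ofList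
    (sites.filter (fun s =>
      decide (max (s.1 * s.1) ((s.1 + 1) * (s.1 + 1)) + max (s.2.1 * s.2.1) ((s.2.1 + 1) * (s.2.1 + 1)) +
        max (s.2.2 * s.2.2) ((s.2.2 + 1) * (s.2.2 + 1)) ≤ rr)))
  let verts : PySem.Set (Int × Int × Int) :=
    cubes.foldl (fun verts cube =>
      [(0 : Int), 1].foldl (fun verts dx =>
        [(0 : Int), 1].foldl (fun verts dy =>
          [(0 : Int), 1].foldl (fun verts dz =>
            PySem.Set.add verts (cube.1 + dx, cube.2.1 + dy, cube.2.2 + dz))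
            verts) verts) verts) PySem.Set.empty
  (verts, cubes)

-- ===== PRECONDITION & SPEC =====
def Spec_cubical_ball (R : Int) (out : (List (Int × Int × Int)) × (List (Int × Int × Int))) : Prop := out = cubical_ball_alt R
instance (R : Int) (out : (List (Int × Int × Int)) × (List (Int × Int × Int))) : Decidable (Spec_cubical_ball R out) := by unfold Spec_cubical_ball; infer_instance

-- ===== CLAIM (what is proved, stated in full; the proofs are below) =====
def Claim_equal_cubical_ball : Prop := ∀ (R : Int), Dom_cubical_ball R → Spec_cubical_ball R (cubical_ball R)

-- ===== LEMMAS AND PROOFS =====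

-- the full grid of lattice points scanned by both programs
def pvGrid (R : Int) : List (Int × Int × Int) :=
  (PySem.List.pyRange (-R) (R + 1)).flatMap (fun x =>
    (PySem.List.pyRange (-R) (R + 1)).flatMap (fun y =>
      (PySem.List.pyRange (-R) (R + 1)).map (fun z => (x, y, z))))

-- A's corner-membership test, as a Bool predicate on a point
def pvPredA (R : Int) (s : Int × Int × Int) : Bool :=
  ([(0 : Int), 1].flatMap (fun dx => [(0 : Int), 1].flatMap (fun dy =>
    [(0 : Int), 1].map (fun dz => (s.1 + dx, s.2.1 + dy, s.2.2 + dz))))).all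
      (fun c => PySem.Set.contains (PySem.Set.ofList (z3_ball_sites R)) c)

-- B's arithmetic test, as a Bool predicate on a point
def pvPredB (R : Int) (s : Int × Int × Int) : Bool :=
  decide (max (s.1 * s.1) ((s.1 + 1) * (s.1 + 1)) + max (s.2.1 * s.2.1) ((s.2.1 + 1) * (s.2.1 + 1)) +
    max (s.2.2 * s.2.2) ((s.2.2 + 1) * (s.2.2 + 1)) ≤ R * R)

lemma z3_eq_filter_grid (R : Int) :
    z3_ball_sites R =
      (pvGrid R).filter (fun s => decide (s.1 * s.1 + s.2.1 * s.2.1 + s.2.2 * s.2.2 ≤ R * R)) := by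
  unfold z3_ball_sites pvGrid
  simp only [PySem.List.foldl_append_ite, PySem.List.foldl_append_eq_flatMap, List.nil_append,
    List.filter_flatMap, List.filter_map, Function.comp_def]

lemma nodup_grid (R : Int) : (pvGrid R).Nodup := by
  unfold pvGrid
  rw [List.nodup_flatMap]
  refine ⟨fun x _ => ?_, ?_⟩
  · rw [List.nodup_flatMap]
    refine ⟨fun y _ => (PySem.List.nodup_pyRange_one _ _).map (fun a b h => by simpa using h), ?_⟩
    refine (PySem.List.nodup_pyRange_one _ _).imp (fun {a b} hab => ?_)
    intro p hpa hpb
    simp only [List.mem_map] at hpa hpb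
    obtain ⟨za, _, hza⟩ := hpa; obtain ⟨zb, _, hzb⟩ := hpb
    exact hab (by simpa using congrArg (·.2.1) (hza.trans hzb.symm))
  · refine (PySem.List.nodup_pyRange_one _ _).imp (fun {a b} hab => ?_)
    intro p hpa hpb
    simp only [List.mem_flatMap, List.mem_map] at hpa hpb
    obtain ⟨_, _, _, _, hza⟩ := hpa; obtain ⟨_, _, _, _, hzb⟩ := hpb
    exact hab (by simpa using congrArg (·.1) (hza.trans hzb.symm))

lemma nodup_z3 (R : Int) : (z3_ball_sites R).Nodup := by
  rw [z3_eq_filter_grid]; exact (nodup_grid R).filter _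

lemma mem_z3 (R a b c : Int) :
    (a, b, c) ∈ z3_ball_sites R ↔
      (-R ≤ a ∧ a < R + 1) ∧ (-R ≤ b ∧ b < R + 1) ∧ (-R ≤ c ∧ c < R + 1) ∧
        a * a + b * b + c * c ≤ R * R := by
  rw [z3_eq_filter_grid]
  unfold pvGrid
  simp only [List.mem_filter, List.mem_flatMap, List.mem_map, PySem.List.mem_pyRange_one,
    decide_eq_true_eq]
  constructor
  · rintro ⟨⟨x, hx, y, hy, z, hz, h⟩, hb⟩
    obtain ⟨rfl, rfl, rfl⟩ : x = a ∧ y = b ∧ z = c :=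
      ⟨congrArg (·.1) h, congrArg (·.2.1) h, congrArg (·.2.2) h⟩
    exact ⟨hx, hy, hz, hb⟩
  · rintro ⟨ha, hb, hc, hball⟩
    exact ⟨⟨a, ha, b, hb, c, hc, rfl⟩, hball⟩

lemma sq_bounds (t R : Int) (h : t * t ≤ R * R) (hR : 0 ≤ R) : -R ≤ t ∧ t < R + 1 := by
  constructor <;> nlinarith

-- the per-axis max test equals "every corner inside the ball"
lemma key_iff (R x y z : Int) :
    (max (x * x) ((x + 1) * (x + 1)) + max (y * y) ((y + 1) * (y + 1)) +
        max (z * z) ((z + 1) * (z + 1)) ≤ R * R) ↔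
      (∀ dx ∈ [(0 : Int), 1], ∀ dy ∈ [(0 : Int), 1], ∀ dz ∈ [(0 : Int), 1],
          (x + dx) * (x + dx) + (y + dy) * (y + dy) + (z + dz) * (z + dz) ≤ R * R) := by
  constructor
  · intro h dx hdx dy hdy dz hdz
    have hdx' : dx = 0 ∨ dx = 1 := by simpa using hdx
    have hdy' : dy = 0 ∨ dy = 1 := by simpa using hdy
    have hdz' : dz = 0 ∨ dz = 1 := by simpa using hdz
    have h1 : (x + dx) * (x + dx) ≤ max (x * x) ((x + 1) * (x + 1)) := by
      rcases hdx' with rfl | rfl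
      · simp
      · exact le_max_right _ _
    have h2 : (y + dy) * (y + dy) ≤ max (y * y) ((y + 1) * (y + 1)) := by
      rcases hdy' with rfl | rfl
      · simp
      · exact le_max_right _ _
    have h3 : (z + dz) * (z + dz) ≤ max (z * z) ((z + 1) * (z + 1)) := by
      rcases hdz' with rfl | rfl
      · simp
      · exact le_max_right _ _
    linarith
  · intro g
    have h000 := g 0 (by simp) 0 (by simp) 0 (by simp)
    have h001 := g 0 (by simp) 0 (by simp) 1 (by simp)
    have h010 := g 0 (by simp) 1 (by simp) 0 (by simp)
    have h011 := g 0 (by simp) 1 (by simp) 1 (by simp)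
    have h100 := g 1 (by simp) 0 (by simp) 0 (by simp)
    have h101 := g 1 (by simp) 0 (by simp) 1 (by simp)
    have h110 := g 1 (by simp) 1 (by simp) 0 (by simp)
    have h111 := g 1 (by simp) 1 (by simp) 1 (by simp)
    simp only [add_zero] at h000 h001 h010 h011 h100 h101 h110 h111
    rcases max_cases (x * x) ((x + 1) * (x + 1)) with ⟨e1, _⟩ | ⟨e1, _⟩ <;>
      rcases max_cases (y * y) ((y + 1) * (y + 1)) with ⟨e2, _⟩ | ⟨e2, _⟩ <;>
        rcases max_cases (z * z) ((z + 1) * (z + 1)) with ⟨e3, _⟩ | ⟨e3, _⟩ <;>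
          rw [e1, e2, e3] <;> linarith

lemma pred_eq_on_grid (R : Int) (s : Int × Int × Int) (hs : s ∈ pvGrid R) :
    pvPredB R s =
      (pvPredA R s && decide (s.1 * s.1 + s.2.1 * s.2.1 + s.2.2 * s.2.2 ≤ R * R)) := by
  obtain ⟨x, y, z⟩ := s
  have hxyz : (-R ≤ x ∧ x < R + 1) ∧ (-R ≤ y ∧ y < R + 1) ∧ (-R ≤ z ∧ z < R + 1) := by
    unfold pvGrid at hs
    simp only [List.mem_flatMap, List.mem_map, PySem.List.mem_pyRange_one] at hs
    obtain ⟨a, ha, b, hb, c, hc, h⟩ := hs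
    obtain ⟨rfl, rfl, rfl⟩ : a = x ∧ b = y ∧ c = z :=
      ⟨congrArg (·.1) h, congrArg (·.2.1) h, congrArg (·.2.2) h⟩
    exact ⟨ha, hb, hc⟩
  have hR : 0 ≤ R := by omega
  rw [Bool.eq_iff_iff]
  unfold pvPredA pvPredB
  simp only [List.all_eq_true, List.mem_flatMap, List.mem_map, Bool.and_eq_true,
    decide_eq_true_eq, PySem.Set.contains_iff, PySem.Set.mem_ofList]
  rw [key_iff R x y z]
  constructor
  · intro h
    refine ⟨fun c hc => ?_, by have := h 0 (by simp) 0 (by simp) 0 (by simp); simpa using this⟩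
    obtain ⟨dx, hdx, dy, hdy, dz, hdz, rfl⟩ := hc
    have hball := h dx hdx dy hdy dz hdz
    rw [mem_z3]
    exact ⟨sq_bounds _ _ (by nlinarith) hR, sq_bounds _ _ (by nlinarith) hR,
      sq_bounds _ _ (by nlinarith) hR, hball⟩
  · rintro ⟨h, -⟩
    intro dx hdx dy hdy dz hdz
    have hm := h (x + dx, y + dy, z + dz) ⟨dx, hdx, dy, hdy, dz, hdz, rfl⟩
    rw [mem_z3] at hm
    exact hm.2.2.2

-- 'for s in l: if p(s): out.add(s)' over a duplicate-free list builds exactly the filtered list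
lemma foldl_setadd_if (l : List (Int × Int × Int)) (hl : l.Nodup) (p : (Int × Int × Int) → Bool) :
    l.foldl (fun acc s => if p s then PySem.Set.add acc s else acc) PySem.Set.empty = l.filter p := by
  rw [PySem.List.foldl_if_eq_foldl_filter p PySem.Set.add,
    show (PySem.Set.empty : PySem.Set (Int × Int × Int)) = ([] : List (Int × Int × Int)) from rfl,
    ← PySem.Set.ofList_eq_foldl, PySem.Set.ofList_eq_self_of_nodup _ (hl.filter _)]

lemma cubes_A (R : Int) :
    (cubical_ball R).2 = (pvGrid R).filter (fun s =>
      pvPredA R s && decide (s.1 * s.1 + s.2.1 * s.2.1 + s.2.2 * s.2.2 ≤ R * R)) := by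
  have h0 : (cubical_ball R).2 = (PySem.Set.ofList (z3_ball_sites R)).foldl
      (fun cubes s => if pvPredA R s then PySem.Set.add cubes s else cubes) PySem.Set.empty := rfl
  rw [h0, PySem.Set.ofList_eq_self_of_nodup _ (nodup_z3 R),
    foldl_setadd_if _ (nodup_z3 R) (pvPredA R), z3_eq_filter_grid, List.filter_filter]

lemma cubes_B (R : Int) :
    (cubical_ball_alt R).2 = (pvGrid R).filter (fun s =>
      pvPredB R s && decide (s.1 * s.1 + s.2.1 * s.2.1 + s.2.2 * s.2.2 ≤ R * R)) := by
  have h0 : (cubical_ball_alt R).2 = PySem.Set.ofList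
      ((PySem.Set.ofList ((pvGrid R).filter (fun s =>
          decide (s.1 * s.1 + s.2.1 * s.2.1 + s.2.2 * s.2.2 ≤ R * R)))).filter
        (pvPredB R)) := by
    have hgen : (PySem.List.pyRange (-R) (R + 1)).flatMap (fun x =>
        (PySem.List.pyRange (-R) (R + 1)).flatMap (fun y =>
          ((PySem.List.pyRange (-R) (R + 1)).filter
            (fun z => decide (x * x + y * y + z * z ≤ R * R))).map (fun z => (x, y, z)))) =
        (pvGrid R).filter (fun s =>
          decide (s.1 * s.1 + s.2.1 * s.2.1 + s.2.2 * s.2.2 ≤ R * R)) := by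
      unfold pvGrid
      simp only [List.filter_flatMap, List.filter_map, Function.comp_def]
    exact hgen ▸ rfl
  rw [h0,
    PySem.Set.ofList_eq_self_of_nodup _ ((nodup_grid R).filter _),
    PySem.Set.ofList_eq_self_of_nodup _ (((nodup_grid R).filter _).filter _),
    List.filter_filter]

lemma cubes_eq (R : Int) : (cubical_ball R).2 = (cubical_ball_alt R).2 := by
  rw [cubes_A, cubes_B]
  refine List.filter_congr (fun s hs => ?_)
  rw [pred_eq_on_grid R s hs, Bool.and_assoc, Bool.and_self]

-- ===== VERDICT (by name: the statement is the Claim_ definition above) =====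
theorem cubical_ball_spec : Claim_equal_cubical_ball := by
  intro R _
  show cubical_ball R = cubical_ball_alt R
  have hc := cubes_eq R
  have hv : (cubical_ball R).1 = (cubical_ball_alt R).1 := by
    show ((cubical_ball R).2).foldl (fun verts cube =>
        [(0 : Int), 1].foldl (fun verts dx =>
          [(0 : Int), 1].foldl (fun verts dy =>
            [(0 : Int), 1].foldl (fun verts dz =>
              PySem.Set.add verts (cube.1 + dx, cube.2.1 + dy, cube.2.2 + dz))
              verts) verts) verts) PySem.Set.empty =
      ((cubical_ball_alt R).2).foldl (fun verts cube =>
        [(0 : Int), 1].foldl (fun verts dx =>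
          [(0 : Int), 1].foldl (fun verts dy =>
            [(0 : Int), 1].foldl (fun verts dz =>
              PySem.Set.add verts (cube.1 + dx, cube.2.1 + dy, cube.2.2 + dz))
              verts) verts) verts) PySem.Set.empty
    rw [hc]
  exact Prod.ext_iff.mpr ⟨hv, hc⟩
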